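-- pv_equiv track=rewrite | github.com/aleksandermagi-dev/Lumen.AIv2 | src/lumen/routing/prompt_resolution.py | _explicit_compare_target
-- ===== SOURCE A (Python) =====
-- def _explicit_compare_target(normalized_prompt: str) -> str:
--     patterns = (
--         "compare that to ",
--         "compare this to ",
--         "compare it to ",
--         "compare that with ",
--         "compare this with ",
--         "compare it with ",
--     )
--     for prefix in patterns:
--         if normalized_prompt.startswith(prefix):
--             return normalized_prompt[len(prefix) :].strip()
--     return ""
-- ===== SOURCE B (Python) =====
-- def _explicit_compare_target(normalized_prompt: str) -> str:
--     # Consume the three grammar tokens sequentially instead of scanning six full prefixes.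
--     if not normalized_prompt.startswith("compare "):
--         return ""
--     rest = normalized_prompt[8:]
--     if rest.startswith("that "):
--         rest = rest[5:]
--     elif rest.startswith("this "):
--         rest = rest[5:]
--     elif rest.startswith("it "):
--         rest = rest[3:]
--     else:
--         return ""
--     if rest.startswith("to "):
--         return rest[3:].strip()
--     if rest.startswith("with "):
--         return rest[5:].strip()
--     return ""
-- ===== Notes on version B (the rewrite author's own statement) =====
-- stated objective: simpler
-- what changed: B parses the three grammar tokens sequentially (check 'compare ', then one of that/this/it, then one of to/with, slicing as it goes) instead of A's scan over six precomputed full prefixes.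
import Mathlib
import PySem

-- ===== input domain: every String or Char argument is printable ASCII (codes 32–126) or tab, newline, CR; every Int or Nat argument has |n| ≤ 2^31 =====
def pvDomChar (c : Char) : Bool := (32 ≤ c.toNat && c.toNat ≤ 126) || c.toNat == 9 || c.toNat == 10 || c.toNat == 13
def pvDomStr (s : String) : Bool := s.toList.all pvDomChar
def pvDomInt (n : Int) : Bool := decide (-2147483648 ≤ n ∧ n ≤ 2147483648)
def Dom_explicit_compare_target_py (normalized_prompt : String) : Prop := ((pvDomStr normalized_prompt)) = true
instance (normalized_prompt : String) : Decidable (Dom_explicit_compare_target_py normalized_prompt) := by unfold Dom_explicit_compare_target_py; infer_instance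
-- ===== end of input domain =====

-- B consumes the three grammar tokens ("compare ", that/this/it, to/with) sequentially
-- instead of scanning six full prefixes; objective: simpler, same return value.

-- ===== PORT A =====
def pvA_patterns : List String :=
  ["compare that to ", "compare this to ", "compare it to ",
   "compare that with ", "compare this with ", "compare it with "]

-- the 'for prefix in patterns: if startswith: return …' loop
def pvA_go (s : List Char) : List String → List Char
  | [] => []
  | p :: ps =>
    if PySem.Chars.startswith s p.toList then
      PySem.Chars.strip (PySem.Chars.slice s (some (PySem.Chars.len p.toList)) none)
    else pvA_go s ps

def explicit_compare_target_py (normalized_prompt : String) : String :=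
  String.ofList (pvA_go normalized_prompt.toList pvA_patterns)

-- ===== PORT B =====
-- the two trailing 'if rest.startswith(conn): return rest[len(conn):].strip()' tests
def pvB_conn (r : List Char) : String :=
  if PySem.Chars.startswith r "to ".toList then
    String.ofList (PySem.Chars.strip (PySem.Chars.slice r (some 3) none))
  else if PySem.Chars.startswith r "with ".toList then
    String.ofList (PySem.Chars.strip (PySem.Chars.slice r (some 5) none))
  else ""

def explicit_compare_target_py_alt (normalized_prompt : String) : String :=
  let s := normalized_prompt.toList
  if PySem.Chars.startswith s "compare ".toList then
    let rest := PySem.Chars.slice s (some 8) none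
    if PySem.Chars.startswith rest "that ".toList then
      pvB_conn (PySem.Chars.slice rest (some 5) none)
    else if PySem.Chars.startswith rest "this ".toList then
      pvB_conn (PySem.Chars.slice rest (some 5) none)
    else if PySem.Chars.startswith rest "it ".toList then
      pvB_conn (PySem.Chars.slice rest (some 3) none)
    else ""
  else ""

-- ===== PRECONDITION & SPEC =====
def Spec_explicit_compare_target_py (normalized_prompt : String) (out : String) : Prop := out = explicit_compare_target_py_alt normalized_prompt
instance (normalized_prompt : String) (out : String) : Decidable (Spec_explicit_compare_target_py normalized_prompt out) := by unfold Spec_explicit_compare_target_py; infer_instance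

-- ===== CLAIM (what is proved, stated in full; the proofs are below) =====
def Claim_equal_explicit_compare_target_py : Prop := ∀ (normalized_prompt : String), Dom_explicit_compare_target_py normalized_prompt → Spec_explicit_compare_target_py normalized_prompt (explicit_compare_target_py normalized_prompt)

-- ===== LEMMAS AND PROOFS =====

-- s.startswith(p ++ q) tests p, then q after dropping |p| characters
lemma pv_sw_append (s p q : List Char) :
    PySem.Chars.startswith s (p ++ q) =
      (PySem.Chars.startswith s p && PySem.Chars.startswith (s.drop p.length) q) := by
  by_cases h : p <+: s
  · obtain ⟨t, rfl⟩ := h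
    have e1 : PySem.Chars.startswith (p ++ t) p = true :=
      (PySem.Chars.startswith_iff _ _).mpr (List.prefix_append p t)
    have e2 : PySem.Chars.startswith (p ++ t) (p ++ q) = PySem.Chars.startswith t q := by
      by_cases hq : q <+: t
      · rw [(PySem.Chars.startswith_iff t q).mpr hq,
            (PySem.Chars.startswith_iff _ _).mpr ((List.prefix_append_right_inj p).mpr hq)]
      · rw [Bool.eq_false_iff.mpr (fun hc => hq ((PySem.Chars.startswith_iff _ _).mp hc)),
            Bool.eq_false_iff.mpr (fun hc => hq ((List.prefix_append_right_inj p).mp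
              ((PySem.Chars.startswith_iff _ _).mp hc)))]
    simp [e1, e2]
  · have e1 : PySem.Chars.startswith s p = false :=
      Bool.eq_false_iff.mpr (fun hc => h ((PySem.Chars.startswith_iff _ _).mp hc))
    have e2 : PySem.Chars.startswith s (p ++ q) = false :=
      Bool.eq_false_iff.mpr (fun hc => h ((List.prefix_append p q).trans
        ((PySem.Chars.startswith_iff _ _).mp hc)))
    simp [e1, e2]

-- slice l (some i) none with a nonnegative literal bound is a drop
lemma pv_sliceI (l : List Char) (i : Int) (n : Nat) (h : i = (n : Int)) :
    PySem.Chars.slice l (some i) none = l.drop n := by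
  subst h
  simp [PySem.List.slice_from_natCast]

lemma pv_main (s : List Char) :
    String.ofList (pvA_go s pvA_patterns) =
      explicit_compare_target_py_alt (String.ofList s) := by
  have d1 : ("compare that to ").toList = "compare ".toList ++ ("that ".toList ++ "to ".toList) := by decide
  have d2 : ("compare this to ").toList = "compare ".toList ++ ("this ".toList ++ "to ".toList) := by decide
  have d3 : ("compare it to ").toList = "compare ".toList ++ ("it ".toList ++ "to ".toList) := by decide
  have d4 : ("compare that with ").toList = "compare ".toList ++ ("that ".toList ++ "with ".toList) := by decide
  have d5 : ("compare this with ").toList = "compare ".toList ++ ("this ".toList ++ "with ".toList) := by decide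
  have d6 : ("compare it with ").toList = "compare ".toList ++ ("it ".toList ++ "with ".toList) := by decide
  have s3 := fun (l : List Char) => pv_sliceI l 3 3 (by norm_num)
  have s5 := fun (l : List Char) => pv_sliceI l 5 5 (by norm_num)
  have s8 := fun (l : List Char) => pv_sliceI l 8 8 (by norm_num)
  have sC := fun (l : List Char) (n : Nat) => pv_sliceI l (n : Int) n rfl
  have L0 : ("compare ").toList.length = 8 := by decide
  have L1 : ("that ").toList.length = 5 := by decide
  have L2 : ("this ").toList.length = 5 := by decide
  have L3 : ("it ").toList.length = 3 := by decide
  have L4 : ("to ").toList.length = 3 := by decide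
  have L5 : ("with ").toList.length = 5 := by decide
  simp only [pvA_patterns, pvA_go, explicit_compare_target_py_alt, pvB_conn, String.toList_ofList,
    d1, d2, d3, d4, d5, d6, pv_sw_append, PySem.Chars.len_eq, List.length_append,
    sC, s3, s5, s8, L0, L1, L2, L3, L4, L5, List.drop_drop]
  norm_num
  -- the three pronoun tests are mutually exclusive
  have e12 : ∀ r : List Char, PySem.Chars.startswith r ['t','h','a','t',' '] = true →
      PySem.Chars.startswith r ['t','h','i','s',' '] = true → False := by
    intro r a b
    rcases List.prefix_or_prefix_of_prefix ((PySem.Chars.startswith_iff _ _).mp a)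
      ((PySem.Chars.startswith_iff _ _).mp b) with h | h <;> revert h <;> decide
  have e13 : ∀ r : List Char, PySem.Chars.startswith r ['t','h','a','t',' '] = true →
      PySem.Chars.startswith r ['i','t',' '] = true → False := by
    intro r a b
    rcases List.prefix_or_prefix_of_prefix ((PySem.Chars.startswith_iff _ _).mp a)
      ((PySem.Chars.startswith_iff _ _).mp b) with h | h <;> revert h <;> decide
  have e23 : ∀ r : List Char, PySem.Chars.startswith r ['t','h','i','s',' '] = true →
      PySem.Chars.startswith r ['i','t',' '] = true → False := by
    intro r a b
    rcases List.prefix_or_prefix_of_prefix ((PySem.Chars.startswith_iff _ _).mp a)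
      ((PySem.Chars.startswith_iff _ _).mp b) with h | h <;> revert h <;> decide
  by_cases h0 : PySem.Chars.startswith s ['c','o','m','p','a','r','e',' '] <;>
  by_cases h1 : PySem.Chars.startswith (List.drop 8 s) ['t','h','a','t',' '] <;>
  by_cases h2 : PySem.Chars.startswith (List.drop 8 s) ['t','h','i','s',' '] <;>
  by_cases h3 : PySem.Chars.startswith (List.drop 8 s) ['i','t',' '] <;>
  first
    | exact (e12 _ h1 h2).elim
    | exact (e13 _ h1 h3).elim
    | exact (e23 _ h2 h3).elim
    | (simp [h0, h1, h2, h3, apply_ite String.ofList]; try (split_ifs <;> rfl))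

-- ===== VERDICT (by name: the statement is the Claim_ definition above) =====
theorem explicit_compare_target_py_spec : Claim_equal_explicit_compare_target_py := by
  intro np _
  unfold Spec_explicit_compare_target_py explicit_compare_target_py
  have h := pv_main np.toList
  rwa [String.ofList_toList] at h
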